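-- pv_equiv track=rewrite | github.com/clarafayyad/beyond-speech-hri | multimodal_perception/audio/transcribe_audio.py | _limit_repetition
-- ===== SOURCE A (Python) =====
-- def _limit_repetition(text):
--     words = text.split()
--     result = []
--
--     for w in words:
--         # allow natural repetition, block pathological loops
--         if len(result) >= 4 and all(x == w for x in result[-4:]):
--             continue
--         result.append(w)
--
--     return " ".join(result)
-- ===== SOURCE B (Python) =====
-- def _limit_repetition(text):
--     words = text.split()
--     out = []
--     i = 0
--     n = len(words)
--     while i < n:
--         j = i + 1
--         while j < n and words[j] == words[i]:
--             j += 1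
--         out += [words[i]] * min(j - i, 4)
--         i = j
--     return " ".join(out)
-- ===== Notes on version B (the rewrite author's own statement) =====
-- stated objective: alternative
-- what changed: A scans word by word keeping a result list and skipping a word when the last four appended words all equal it; B instead groups the words into maximal runs of equal words and emits min(run_length, 4) copies per run.
import Mathlib
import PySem

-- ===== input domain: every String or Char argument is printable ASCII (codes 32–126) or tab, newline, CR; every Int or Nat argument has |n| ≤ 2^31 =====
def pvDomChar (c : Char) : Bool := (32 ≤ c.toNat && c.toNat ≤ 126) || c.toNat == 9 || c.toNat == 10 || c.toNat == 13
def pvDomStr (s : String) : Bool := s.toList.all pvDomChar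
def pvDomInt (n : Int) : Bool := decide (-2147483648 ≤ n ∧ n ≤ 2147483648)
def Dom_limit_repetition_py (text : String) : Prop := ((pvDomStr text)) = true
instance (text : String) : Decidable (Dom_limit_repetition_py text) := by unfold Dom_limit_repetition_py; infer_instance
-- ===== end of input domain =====

-- B replaces A's per-word sliding last-4 tail check with a run-grouping pass that emits min(run,4) copies per maximal run; objective: alternative decomposition, same cost.


-- ===== PORT A =====
-- step of A's loop: skip w when result has ≥ 4 elements and its last four (result[-4:]) all equal w
def pvStepA (result : List String) (w : String) : List String :=
  if 4 ≤ result.length ∧ (PySem.List.slice result (some (-4)) none).all (· == w) then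
    result
  else
    result ++ [w]

def limit_repetition_py (text : String) : String :=
  let words := PySem.Str.split₀ text
  let result := words.foldl pvStepA []
  PySem.Str.join " " result

-- ===== PORT B =====
-- B's outer while-loop: take the maximal run of the first word (inner j-scan), emit min(run, 4) copies,
-- continue after the run
def pvRunsB : List String → List String
  | [] => []
  | w :: rest =>
      List.replicate (min ((rest.takeWhile (· == w)).length + 1) 4) w
        ++ pvRunsB (rest.dropWhile (· == w))
termination_by xs => xs.length
decreasing_by
  simp only [List.length_cons]
  exact Nat.lt_succ_of_le (List.length_dropWhile_le _ _)

def limit_repetition_py_alt (text : String) : String :=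
  PySem.Str.join " " (pvRunsB (PySem.Str.split₀ text))

-- ===== PRECONDITION & SPEC =====
def Spec_limit_repetition_py (text : String) (out : String) : Prop := out = limit_repetition_py_alt text
instance (text : String) (out : String) : Decidable (Spec_limit_repetition_py text out) := by unfold Spec_limit_repetition_py; infer_instance

-- ===== CLAIM (what is proved, stated in full; the proofs are below) =====
def Claim_equal_limit_repetition_py : Prop := ∀ (text : String), Dom_limit_repetition_py text → Spec_limit_repetition_py text (limit_repetition_py text)

-- ===== LEMMAS AND PROOFS =====

-- A's skip condition on a state r₀ ++ replicate k w with r₀ not ending in w holds iff k ≥ 4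
lemma pvCondA_char (r₀ : List String) (k : Nat) (w : String)
    (h₀ : r₀.getLast? ≠ some w) :
    ((4 ≤ (r₀ ++ List.replicate k w).length ∧
      (PySem.List.slice (r₀ ++ List.replicate k w) (some (-4)) none).all (· == w)) ↔ 4 ≤ k) := by
  rw [PySem.List.slice_from_neg_ofNat _ 4 (by norm_num)]
  simp only [List.length_append, List.length_replicate]
  constructor
  · rintro ⟨hlen, hall⟩
    by_contra hk
    rw [Nat.not_le] at hk
    rw [List.drop_append_of_le_length (by omega)] at hall
    have hne : r₀.drop (r₀.length + k - 4) ≠ [] := by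
      simp only [ne_eq, List.drop_eq_nil_iff]
      omega
    have hmem := List.getLast_mem hne
    have hw : (r₀.drop (r₀.length + k - 4)).getLast hne = w := by
      have := List.all_eq_true.mp hall _ (List.mem_append_left _ hmem)
      simpa using this
    have hgl := List.getLast?_drop (l := r₀) (i := r₀.length + k - 4)
    rw [if_neg (by omega), List.getLast?_eq_some_getLast (h := hne), hw] at hgl
    exact h₀ hgl.symm
  · intro hk
    refine ⟨by omega, ?_⟩
    have hrw : (r₀ ++ List.replicate k w).drop (r₀.length + k - 4) = List.replicate 4 w := by
      rw [show r₀.length + k - 4 = r₀.length + (k - 4) by omega, List.drop_append,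
        List.drop_eq_nil_of_le (by omega), List.drop_replicate, List.nil_append]
      congr 1
      omega
    rw [hrw]
    simp

-- processing a run of m copies of w from state r₀ ++ replicate k w (k ≤ 4) caps the run at 4
lemma pvFoldA_run (w : String) (m : Nat) : ∀ (k : Nat) (r₀ : List String),
    r₀.getLast? ≠ some w → k ≤ 4 →
    List.foldl pvStepA (r₀ ++ List.replicate k w) (List.replicate m w)
      = r₀ ++ List.replicate (min (k + m) 4) w := by
  induction m with
  | zero =>
    intro k r₀ h₀ hk
    rw [List.replicate_zero, List.foldl_nil, show min (k + 0) 4 = k by omega]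
  | succ m ih =>
    intro k r₀ h₀ hk
    rw [List.replicate_succ, List.foldl_cons]
    by_cases hc : 4 ≤ k
    · have hA : pvStepA (r₀ ++ List.replicate k w) w = r₀ ++ List.replicate k w := by
        unfold pvStepA
        rw [if_pos ((pvCondA_char r₀ k w h₀).mpr hc)]
      have h4 : k = 4 := Nat.le_antisymm hk hc
      subst h4
      rw [hA, ih 4 r₀ h₀ (Nat.le_refl 4), show min (4 + m) 4 = 4 by omega,
        show min (4 + (m + 1)) 4 = 4 by omega]
    · have hA : pvStepA (r₀ ++ List.replicate k w) w = r₀ ++ List.replicate (k + 1) w := by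
        unfold pvStepA
        rw [if_neg (fun hcon => hc ((pvCondA_char r₀ k w h₀).mp hcon)), List.append_assoc,
          ← List.replicate_succ']
      rw [hA, ih (k + 1) r₀ h₀ (by omega), show k + 1 + m = k + (m + 1) by omega]

-- the first word of a dropWhile tail fails the predicate
lemma pvHeadDropWhile (p : String → Bool) (l : List String) (w : String)
    (h : (l.dropWhile p).head? = some w) : p w = false := by
  induction l with
  | nil => simp at h
  | cons a t ih =>
    rw [List.dropWhile_cons] at h
    split at h
    · exact ih h
    · simp at h
      subst h
      simp_all

-- main invariant: A's fold from any state not ending in the next word appends B's run list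
lemma pvFoldA_main : ∀ (ws r₀ : List String),
    (∀ w, ws.head? = some w → r₀.getLast? ≠ some w) →
    List.foldl pvStepA r₀ ws = r₀ ++ pvRunsB ws := by
  intro ws
  induction ws using pvRunsB.induct with
  | case1 =>
    intro r₀ _
    simp [pvRunsB]
  | case2 w rest ih =>
    intro r₀ h
    have h₀ : r₀.getLast? ≠ some w := h w rfl
    have htk : rest.takeWhile (· == w) = List.replicate (rest.takeWhile (· == w)).length w := by
      apply List.eq_replicate_of_mem
      intro b hb
      have := List.mem_takeWhile_imp hb
      simpa using this
    have hsplit : w :: rest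
        = List.replicate ((rest.takeWhile (· == w)).length + 1) w ++ rest.dropWhile (· == w) := by
      conv_lhs => rw [← List.takeWhile_append_dropWhile (p := (· == w)) (l := rest)]
      rw [List.replicate_succ, List.cons_append]
      congr 1
      conv_lhs => rw [htk]
    have hrun := pvFoldA_run w ((rest.takeWhile (· == w)).length + 1) 0 r₀ h₀ (by omega)
    simp only [List.replicate_zero, List.append_nil, Nat.zero_add] at hrun
    have hlast : (r₀ ++ List.replicate (min ((rest.takeWhile (· == w)).length + 1) 4) w).getLast?
        = some w := by
      have hm : min ((rest.takeWhile (· == w)).length + 1) 4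
          = (min ((rest.takeWhile (· == w)).length + 1) 4 - 1) + 1 := by omega
      rw [hm, List.replicate_succ', ← List.append_assoc, List.getLast?_concat]
    have hdp : ∀ w', (rest.dropWhile (· == w)).head? = some w' →
        (r₀ ++ List.replicate (min ((rest.takeWhile (· == w)).length + 1) 4) w).getLast?
          ≠ some w' := by
      intro w' hw'
      have hpf : (w' == w) = false := pvHeadDropWhile (· == w) rest w' hw'
      rw [hlast]
      intro hcon
      rw [Option.some_inj] at hcon
      rw [hcon] at hpf
      simp at hpf
    conv_rhs => rw [pvRunsB.eq_def]
    conv_lhs => rw [hsplit]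
    rw [List.foldl_append, hrun, ih _ hdp, List.append_assoc]

-- ===== VERDICT (by name: the statement is the Claim_ definition above) =====
theorem limit_repetition_py_spec : Claim_equal_limit_repetition_py := by
  intro text _
  unfold Spec_limit_repetition_py limit_repetition_py limit_repetition_py_alt
  simp only
  rw [pvFoldA_main (PySem.Str.split₀ text) [] (by intro w _ h; simp at h)]
  rfl
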